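-- pv_equiv track=rewrite | github.com/shuozh/MEG-Net | utils.py | get_135_position
-- ===== SOURCE A (Python) =====
-- def get_135_position(view_n):
--     start_position_list = []
--     for i in range(view_n):
--         start_position_list.append(([i], [0]))
--     for j in range(1, view_n):
--         start_position_list.append(([0], [j]))
--     for item in start_position_list:
--         while item[0][-1] < view_n - 1 and item[1][-1] < view_n - 1:
--             item[0].append(item[0][-1] + 1)
--             item[1].append(item[1][-1] + 1)
--     return start_position_list
-- ===== SOURCE B (Python) =====
-- def get_135_position(view_n):
--     # Build only the main diagonal explicitly; every other diagonal is derived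
--     # from its neighbour by a recurrence: moving down-left drops the first row
--     # index and the last column index, moving up-right drops the last row index
--     # and the first column index.  All work is whole-list slicing.
--     if view_n <= 0:
--         return []
--     result = [(list(range(view_n)), list(range(view_n)))]
--     rows, cols = result[0]
--     for _ in range(1, view_n):
--         rows, cols = rows[1:], cols[:-1]
--         result.append((rows, cols))
--     rows, cols = result[0]
--     for _ in range(1, view_n):
--         rows, cols = rows[:-1], cols[1:]
--         result.append((rows, cols))
--     return result
-- ===== Notes on version B (the rewrite author's own statement) =====
-- stated objective: faster
-- what changed: Instead of seeding one start point per diagonal and growing each diagonal element by element with a while loop, B materialises only the main diagonal and derives every other diagonal from its neighbour by whole-list slicing (down-left drops the first row index and the last column index, up-right the converse).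
import Mathlib
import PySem

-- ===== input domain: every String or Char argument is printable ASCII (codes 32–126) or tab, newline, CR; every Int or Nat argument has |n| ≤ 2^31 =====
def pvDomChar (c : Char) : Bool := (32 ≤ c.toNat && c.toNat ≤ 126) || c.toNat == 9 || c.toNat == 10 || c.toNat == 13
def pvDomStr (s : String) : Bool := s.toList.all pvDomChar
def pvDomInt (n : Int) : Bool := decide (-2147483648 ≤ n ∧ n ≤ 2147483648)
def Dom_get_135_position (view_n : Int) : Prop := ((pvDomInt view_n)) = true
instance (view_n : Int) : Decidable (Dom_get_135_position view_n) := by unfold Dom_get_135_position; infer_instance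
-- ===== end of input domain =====

-- B builds only the main diagonal explicitly and derives every other diagonal from its
-- neighbour by whole-list slicing (down-left drops the first row / last column index,
-- up-right the converse), instead of A's seed-then-while-extend per-element construction.

-- ===== PORT A =====
-- the while loop: extend both lists by last+1 while both last elements are < view_n - 1.
-- item[0][-1] is ported as pyGetD … (-1) (view_n - 1): in A the lists are always nonempty
-- (they start as singletons), so the default is never read and the port is exact there.
def extendA (n : Int) (r c : List Int) : List Int × List Int :=
  let a := PySem.List.pyGetD r (-1) (n - 1)
  let b := PySem.List.pyGetD c (-1) (n - 1)
  if _h : a < n - 1 ∧ b < n - 1 then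
    extendA n (r ++ [a + 1]) (c ++ [b + 1])
  else
    (r, c)
termination_by (n - 1 - PySem.List.pyGetD r (-1) (n - 1)).toNat
decreasing_by
  simp only [PySem.List.pyGetD_neg_one_append_singleton]
  omega

def get_135_position (view_n : Int) : List (List (List Int)) :=
  let starts : List (List Int × List Int) :=
    (PySem.List.pyRange 0 view_n 1).map (fun i => ([i], [(0 : Int)]))
    ++ (PySem.List.pyRange 1 view_n 1).map (fun j => ([(0 : Int)], [j]))
  starts.map (fun item =>
    let p := extendA view_n item.1 item.2
    [p.1, p.2])

-- ===== PORT B =====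
-- loop body of the first loop: rows, cols = rows[1:], cols[:-1]; result.append((rows, cols))
def stepDL (s : List (List (List Int)) × List Int × List Int) (_x : Int) :
    List (List (List Int)) × List Int × List Int :=
  let rows := PySem.List.slice s.2.1 (some 1) none
  let cols := PySem.List.slice s.2.2 none (some (-1))
  (s.1 ++ [[rows, cols]], rows, cols)

-- loop body of the second loop: rows, cols = rows[:-1], cols[1:]; result.append((rows, cols))
def stepUR (s : List (List (List Int)) × List Int × List Int) (_x : Int) :
    List (List (List Int)) × List Int × List Int :=
  let rows := PySem.List.slice s.2.1 none (some (-1))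
  let cols := PySem.List.slice s.2.2 (some 1) none
  (s.1 ++ [[rows, cols]], rows, cols)

def get_135_position_alt (view_n : Int) : List (List (List Int)) :=
  if view_n ≤ 0 then []
  else
    -- result = [(list(range(view_n)), list(range(view_n)))]; rows, cols = result[0]
    ((PySem.List.pyRange 1 view_n 1).foldl stepUR
      (((PySem.List.pyRange 1 view_n 1).foldl stepDL
          ([[PySem.List.pyRange 0 view_n 1, PySem.List.pyRange 0 view_n 1]],
           PySem.List.pyRange 0 view_n 1, PySem.List.pyRange 0 view_n 1)).1,
       PySem.List.pyRange 0 view_n 1, PySem.List.pyRange 0 view_n 1)).1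

-- ===== PRECONDITION & SPEC =====
def Spec_get_135_position (view_n : Int) (out : List (List (List Int))) : Prop := out = get_135_position_alt view_n
instance (view_n : Int) (out : List (List (List Int))) : Decidable (Spec_get_135_position view_n out) := by unfold Spec_get_135_position; infer_instance

-- ===== CLAIM (what is proved, stated in full; the proofs are below) =====
def Claim_equal_get_135_position : Prop := ∀ (view_n : Int), Dom_get_135_position view_n → Spec_get_135_position view_n (get_135_position view_n)

-- ===== LEMMAS AND PROOFS =====

-- Characterisation of A's while loop: starting from nonempty lists with last elements a, b,
-- it appends exactly m = max 0 (n-1-max a b) increments to each list.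
lemma extendA_spec (n : Int) :
    ∀ (m : Nat) (a b : Int) (r c : List Int),
      r.getLast? = some a → c.getLast? = some b → m = (n - 1 - max a b).toNat →
      extendA n r c =
        (r ++ PySem.List.pyRange (a + 1) (a + 1 + m) 1,
         c ++ PySem.List.pyRange (b + 1) (b + 1 + m) 1) := by
  intro m
  induction m with
  | zero =>
    intro a b r c hr hc hm
    have hr' : PySem.List.pyGetD r (-1) (n - 1) = a := by
      simp [PySem.List.pyGetD, PySem.List.pyGet?_neg_one, hr]
    have hc' : PySem.List.pyGetD c (-1) (n - 1) = b := by
      simp [PySem.List.pyGetD, PySem.List.pyGet?_neg_one, hc]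
    rw [extendA, hr', hc']
    have : ¬ (a < n - 1 ∧ b < n - 1) := by omega
    rw [dif_neg this]
    rw [PySem.List.pyRange_one_eq_nil (by push_cast; omega),
        PySem.List.pyRange_one_eq_nil (by push_cast; omega)]
    simp
  | succ m ih =>
    intro a b r c hr hc hm
    have hr' : PySem.List.pyGetD r (-1) (n - 1) = a := by
      simp [PySem.List.pyGetD, PySem.List.pyGet?_neg_one, hr]
    have hc' : PySem.List.pyGetD c (-1) (n - 1) = b := by
      simp [PySem.List.pyGetD, PySem.List.pyGet?_neg_one, hc]
    rw [extendA, hr', hc']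
    have hcond : a < n - 1 ∧ b < n - 1 := by omega
    rw [dif_pos hcond]
    rw [ih (a + 1) (b + 1) (r ++ [a + 1]) (c ++ [b + 1]) (by simp) (by simp) (by omega)]
    rw [List.append_assoc, List.append_assoc]
    have ha : PySem.List.pyRange (a + 1) (a + 1 + ((m : Int) + 1)) 1
        = (a + 1) :: PySem.List.pyRange (a + 1 + 1) (a + 1 + 1 + (m : Int)) 1 := by
      rw [PySem.List.pyRange_one_cons (by omega)]
      congr 2
      omega
    have hb : PySem.List.pyRange (b + 1) (b + 1 + ((m : Int) + 1)) 1
        = (b + 1) :: PySem.List.pyRange (b + 1 + 1) (b + 1 + 1 + (m : Int)) 1 := by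
      rw [PySem.List.pyRange_one_cons (by omega)]
      congr 2
      omega
    push_cast
    rw [ha, hb]
    simp

-- A's entry starting at (x, 0)-shape: closed pyRange form of the extended diagonal.
lemma extendA_start_left (n i : Int) (h0 : 0 ≤ i) (hi : i < n) :
    extendA n [i] [0] = (PySem.List.pyRange i n 1, PySem.List.pyRange 0 (n - i) 1) := by
  rw [extendA_spec n (n - 1 - max i 0).toNat i 0 [i] [0] (by simp) (by simp) rfl]
  have hmax : max i 0 = i := by omega
  rw [hmax]
  have hm : ((n - 1 - i).toNat : Int) = n - 1 - i := by omega
  rw [hm]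
  rw [Prod.mk.injEq]
  refine ⟨?_, ?_⟩
  · have e : i + 1 + (n - 1 - i) = n := by omega
    rw [e, PySem.List.pyRange_one_cons (show i < n by omega)]
    rfl
  · have e : (0 : Int) + 1 + (n - 1 - i) = n - i := by omega
    rw [e, PySem.List.pyRange_one_cons (show (0:Int) < n - i by omega)]
    rfl

lemma extendA_start_top (n j : Int) (h0 : 0 ≤ j) (hj : j < n) :
    extendA n [0] [j] = (PySem.List.pyRange 0 (n - j) 1, PySem.List.pyRange j n 1) := by
  rw [extendA_spec n (n - 1 - max (0:Int) j).toNat 0 j [0] [j] (by simp) (by simp) rfl]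
  have hmax : max (0:Int) j = j := by omega
  rw [hmax]
  have hm : ((n - 1 - j).toNat : Int) = n - 1 - j := by omega
  rw [hm]
  rw [Prod.mk.injEq]
  refine ⟨?_, ?_⟩
  · have e : (0 : Int) + 1 + (n - 1 - j) = n - j := by omega
    rw [e, PySem.List.pyRange_one_cons (show (0:Int) < n - j by omega)]
    rfl
  · have e : j + 1 + (n - 1 - j) = n := by omega
    rw [e, PySem.List.pyRange_one_cons (show j < n by omega)]
    rfl

-- rows[1:] of a diagonal range
lemma slice_tail_pyRange (a b : Int) (h : a < b) :
    PySem.List.slice (PySem.List.pyRange a b 1) (some 1) none = PySem.List.pyRange (a + 1) b 1 := by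
  rw [PySem.List.slice_from_one, PySem.List.pyRange_one_cons h]
  rfl

-- cols[:-1] of a diagonal range
lemma slice_dropLast_pyRange (a b : Int) (h : a < b) :
    PySem.List.slice (PySem.List.pyRange a b 1) none (some (-1)) = PySem.List.pyRange a (b - 1) 1 := by
  rw [PySem.List.slice_to_neg_one]
  have e : b = (b - 1) + 1 := by omega
  rw [e, PySem.List.pyRange_one_succ_right (by omega)]
  have e2 : b - 1 + 1 - 1 = b - 1 := by omega
  rw [e2]
  simp

-- invariant of the first loop: from diagonal a-1 it emits diagonals a, a+1, …, n-1
lemma foldDL_spec (n : Int) :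
    ∀ (N : Nat) (a : Int) (res : List (List (List Int))),
      1 ≤ a → a ≤ n → (n - a).toNat = N →
      (PySem.List.pyRange a n 1).foldl stepDL
          (res, PySem.List.pyRange (a - 1) n 1, PySem.List.pyRange 0 (n - a + 1) 1)
        = (res ++ (PySem.List.pyRange a n 1).map
              (fun i => [PySem.List.pyRange i n 1, PySem.List.pyRange 0 (n - i) 1]),
           PySem.List.pyRange (n - 1) n 1, PySem.List.pyRange 0 1 1) := by
  intro N
  induction N with
  | zero =>
    intro a res h1 h2 hN
    have ha : a = n := by omega
    subst ha
    rw [PySem.List.pyRange_one_eq_nil (le_refl a)]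
    have e : a - a + 1 = 1 := by omega
    rw [e]
    simp
  | succ N ih =>
    intro a res h1 h2 hN
    have han : a < n := by omega
    rw [PySem.List.pyRange_one_cons han, List.foldl_cons]
    have hstep : stepDL (res, PySem.List.pyRange (a - 1) n 1, PySem.List.pyRange 0 (n - a + 1) 1) a
        = (res ++ [[PySem.List.pyRange a n 1, PySem.List.pyRange 0 (n - a) 1]],
           PySem.List.pyRange a n 1, PySem.List.pyRange 0 (n - a) 1) := by
      unfold stepDL
      dsimp only
      rw [slice_tail_pyRange _ _ (by omega), slice_dropLast_pyRange _ _ (by omega)]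
      have e1 : a - 1 + 1 = a := by omega
      have e2 : n - a + 1 - 1 = n - a := by omega
      rw [e1, e2]
    rw [hstep]
    have h := ih (a + 1) (res ++ [[PySem.List.pyRange a n 1, PySem.List.pyRange 0 (n - a) 1]])
      (by omega) (by omega) (by omega)
    have e1 : a + 1 - 1 = a := by omega
    have e2 : n - (a + 1) + 1 = n - a := by omega
    rw [e1, e2] at h
    rw [h, PySem.List.pyRange_one_cons han, List.map_cons]
    simp [List.append_assoc]
    exact (PySem.List.pyRange_one_cons han).symm

-- invariant of the second loop: from diagonal -(a-1) it emits diagonals -a, …, -(n-1)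
lemma foldUR_spec (n : Int) :
    ∀ (N : Nat) (a : Int) (res : List (List (List Int))),
      1 ≤ a → a ≤ n → (n - a).toNat = N →
      (PySem.List.pyRange a n 1).foldl stepUR
          (res, PySem.List.pyRange 0 (n - a + 1) 1, PySem.List.pyRange (a - 1) n 1)
        = (res ++ (PySem.List.pyRange a n 1).map
              (fun j => [PySem.List.pyRange 0 (n - j) 1, PySem.List.pyRange j n 1]),
           PySem.List.pyRange 0 1 1, PySem.List.pyRange (n - 1) n 1) := by
  intro N
  induction N with
  | zero =>
    intro a res h1 h2 hN
    have ha : a = n := by omega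
    subst ha
    rw [PySem.List.pyRange_one_eq_nil (le_refl a)]
    have e : a - a + 1 = 1 := by omega
    rw [e]
    simp
  | succ N ih =>
    intro a res h1 h2 hN
    have han : a < n := by omega
    rw [PySem.List.pyRange_one_cons han, List.foldl_cons]
    have hstep : stepUR (res, PySem.List.pyRange 0 (n - a + 1) 1, PySem.List.pyRange (a - 1) n 1) a
        = (res ++ [[PySem.List.pyRange 0 (n - a) 1, PySem.List.pyRange a n 1]],
           PySem.List.pyRange 0 (n - a) 1, PySem.List.pyRange a n 1) := by
      unfold stepUR
      dsimp only
      rw [slice_tail_pyRange _ _ (by omega), slice_dropLast_pyRange _ _ (by omega)]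
      have e1 : a - 1 + 1 = a := by omega
      have e2 : n - a + 1 - 1 = n - a := by omega
      rw [e1, e2]
    rw [hstep]
    have h := ih (a + 1) (res ++ [[PySem.List.pyRange 0 (n - a) 1, PySem.List.pyRange a n 1]])
      (by omega) (by omega) (by omega)
    have e1 : a + 1 - 1 = a := by omega
    have e2 : n - (a + 1) + 1 = n - a := by omega
    rw [e1, e2] at h
    rw [h, PySem.List.pyRange_one_cons han, List.map_cons]
    simp [List.append_assoc]
    exact (PySem.List.pyRange_one_cons han).symm

-- ===== VERDICT (by name: the statement is the Claim_ definition above) =====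
theorem get_135_position_spec : Claim_equal_get_135_position := by
  intro n _
  unfold Spec_get_135_position get_135_position get_135_position_alt
  by_cases hn : n ≤ 0
  · rw [if_pos hn, PySem.List.pyRange_one_eq_nil (by omega : n ≤ (0:Int)),
        PySem.List.pyRange_one_eq_nil (by omega : n ≤ (1:Int))]
    rfl
  · rw [if_neg hn]
    have hDL := foldDL_spec n (n - 1).toNat 1
      [[PySem.List.pyRange 0 n 1, PySem.List.pyRange 0 n 1]] le_rfl (by omega) (by omega)
    have e1 : (1 : Int) - 1 = 0 := by omega
    have e2 : n - 1 + 1 = n := by omega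
    rw [e1, e2] at hDL
    rw [hDL]
    have hUR := foldUR_spec n (n - 1).toNat 1
      ([[PySem.List.pyRange 0 n 1, PySem.List.pyRange 0 n 1]]
        ++ (PySem.List.pyRange 1 n 1).map
            (fun i => [PySem.List.pyRange i n 1, PySem.List.pyRange 0 (n - i) 1]))
      le_rfl (by omega) (by omega)
    rw [e1, e2] at hUR
    rw [hUR]
    simp only [List.map_append, List.map_map]
    have hmain : (PySem.List.pyRange 0 n 1).map
          (fun i => [PySem.List.pyRange i n 1, PySem.List.pyRange 0 (n - i) 1])
        = [[PySem.List.pyRange 0 n 1, PySem.List.pyRange 0 n 1]]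
          ++ (PySem.List.pyRange 1 n 1).map
              (fun i => [PySem.List.pyRange i n 1, PySem.List.pyRange 0 (n - i) 1]) := by
      rw [PySem.List.pyRange_one_cons (show (0:Int) < n by omega), List.map_cons]
      norm_num
      exact PySem.List.pyRange_one_cons (by omega)
    congr 1
    · rw [← hmain]
      apply List.map_congr_left
      intro i hi
      have hib := (PySem.List.mem_pyRange_one).1 hi
      simp only [Function.comp]
      rw [extendA_start_left n i hib.1 hib.2]
    · apply List.map_congr_left
      intro j hj
      have hjb := (PySem.List.mem_pyRange_one).1 hj
      simp only [Function.comp]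
      rw [extendA_start_top n j (by omega) hjb.2]
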